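-- pv_equiv track=rewrite | github.com/HDS-2004/occ-mlm-capstone | OOK/real_header_captures.py | find_trailing_zeros_range
-- ===== SOURCE A (Python) =====
-- def find_trailing_zeros_range(arr):
--     i = len(arr) - 1
--     if arr[i] != 0:
--         return None  # No trailing zeros
--
--     end = i
--     while i >= 0 and arr[i] == 0:
--         i -= 1
--     start = i + 1
--     length = end - start + 1
--     return (start, end, length)
-- ===== SOURCE B (Python) =====
-- def find_trailing_zeros_range(arr):
--     if arr[-1] != 0:
--         return None  # No trailing zeros
--     last_nonzero = -1
--     for j, x in enumerate(arr):
--         if x != 0: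
--             last_nonzero = j
--     start = last_nonzero + 1
--     end = len(arr) - 1
--     return (start, end, end - start + 1)
-- ===== Notes on version B (the rewrite author's own statement) =====
-- stated objective: alternative
-- what changed: Replaces A's backward while-loop over the trailing-zero suffix with a single forward pass that folds over the whole array tracking the last nonzero index.
import Mathlib
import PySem

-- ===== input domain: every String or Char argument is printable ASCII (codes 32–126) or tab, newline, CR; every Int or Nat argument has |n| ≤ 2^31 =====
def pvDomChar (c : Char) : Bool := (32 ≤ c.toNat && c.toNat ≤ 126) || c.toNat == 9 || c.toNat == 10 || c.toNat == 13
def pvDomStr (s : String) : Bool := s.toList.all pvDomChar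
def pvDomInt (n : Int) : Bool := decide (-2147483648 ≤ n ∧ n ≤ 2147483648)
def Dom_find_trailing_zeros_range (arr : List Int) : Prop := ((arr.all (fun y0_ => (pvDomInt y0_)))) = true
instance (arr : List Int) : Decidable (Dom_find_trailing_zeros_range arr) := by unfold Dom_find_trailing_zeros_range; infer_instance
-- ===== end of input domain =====

-- B replaces A's backward while-loop over the trailing-zero suffix with one forward
-- fold over the whole array tracking the index of the last nonzero element (alternative decomposition).
-- ===== PORT A =====
-- while i >= 0 and arr[i] == 0: i -= 1   (entered only with i = len-1, arr nonempty)
def pyWhileA (arr : List Int) : Nat → Int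
  | 0 => if PySem.List.pyGet? arr ((0 : Nat) : Int) = some 0 then -1 else 0
  | n+1 => if PySem.List.pyGet? arr ((n+1 : Nat) : Int) = some 0 then pyWhileA arr n
           else ((n+1 : Nat) : Int)

def find_trailing_zeros_range (arr : List Int) : Option (Int × Int × Int) :=
  match PySem.List.pyGet? arr ((arr.length : Int) - 1) with
  | none => none  -- Python raises IndexError here (empty arr); excluded by Pre_
  | some v =>
    if v ≠ 0 then none
    else
      let e : Int := (arr.length : Int) - 1
      let i : Int := pyWhileA arr (arr.length - 1)
      let start := i + 1
      some (start, e, e - start + 1)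

-- ===== PORT B =====
def find_trailing_zeros_range_alt (arr : List Int) : Option (Int × Int × Int) :=
  match PySem.List.pyGet? arr (-1) with
  | none => none  -- Python raises IndexError here (empty arr); excluded by Pre_
  | some v =>
    if v ≠ 0 then none
    else
      let ln : Int := (PySem.List.enumerate arr).foldl
        (fun acc jx => if jx.2 ≠ 0 then jx.1 else acc) (-1)
      let start := ln + 1
      let e : Int := (arr.length : Int) - 1
      some (start, e, e - start + 1)

-- ===== PRECONDITION & SPEC =====
-- Pre_ excludes only the empty list, on which A (and B) raise IndexError.
def Pre_find_trailing_zeros_range (arr : List Int) : Prop := arr ≠ []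
instance (arr : List Int) : Decidable (Pre_find_trailing_zeros_range arr) := by
  unfold Pre_find_trailing_zeros_range; infer_instance
def pvWitness_find_trailing_zeros_range : List Int := [3, 0, 0]
def Spec_find_trailing_zeros_range (arr : List Int) (out : Option (Int × Int × Int)) : Prop := out = find_trailing_zeros_range_alt arr
instance (arr : List Int) (out : Option (Int × Int × Int)) : Decidable (Spec_find_trailing_zeros_range arr out) := by unfold Spec_find_trailing_zeros_range; infer_instance

-- ===== CLAIM (what is proved, stated in full; the proofs are below) =====
def Claim_equal_find_trailing_zeros_range : Prop := ∀ (arr : List Int), Dom_find_trailing_zeros_range arr → Pre_find_trailing_zeros_range arr → Spec_find_trailing_zeros_range arr (find_trailing_zeros_range arr)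

-- ===== LEMMAS AND PROOFS =====
-- B's fold over the enumerated list, as a function
def lastNZ (xs : List Int) : Int :=
  (PySem.List.enumerate xs).foldl (fun acc jx => if jx.2 ≠ 0 then jx.1 else acc) (-1)

theorem lastNZ_append (xs : List Int) (x : Int) :
    lastNZ (xs ++ [x]) = if x ≠ 0 then (xs.length : Int) else lastNZ xs := by
  simp [lastNZ, PySem.List.enumerate_append, List.foldl_append,
        PySem.List.enumerate_cons]

theorem pyWhileA_eq_lastNZ (arr : List Int) (i : Nat) (hi : i < arr.length) :
    pyWhileA arr i = lastNZ (arr.take (i+1)) := by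
  induction i with
  | zero =>
    have h0 : 0 < arr.length := hi
    have htake : arr.take 1 = [arr[0]] := by
      cases arr with
      | nil => simp at h0
      | cons a l => simp
    simp only [pyWhileA, htake, lastNZ, PySem.List.enumerate_cons,
          PySem.List.enumerate_nil, PySem.List.pyGet?_natCast,
          List.getElem?_eq_getElem h0, List.foldl_cons, List.foldl_nil]
    split_ifs with h1 h2 h2 <;> simp_all
  | succ n ih =>
    have hlt : n + 1 < arr.length := hi
    have htake : arr.take (n+2) = arr.take (n+1) ++ [arr[n+1]] := by
      rw [List.take_add_one]
      simp [List.getElem?_eq_getElem hlt]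
    have hlen : (arr.take (n+1)).length = n + 1 := by
      simp [List.length_take]; omega
    rw [pyWhileA, PySem.List.pyGet?_natCast, List.getElem?_eq_getElem hlt,
        htake, lastNZ_append, hlen]
    by_cases hz : arr[n+1] = 0
    · simp [hz, ih (by omega)]
    · simp [hz]

-- ===== VERDICT (by name: the statement is the Claim_ definition above) =====
theorem find_trailing_zeros_range_spec : Claim_equal_find_trailing_zeros_range := by
  intro arr _ hne
  unfold Spec_find_trailing_zeros_range find_trailing_zeros_range find_trailing_zeros_range_alt
  have hlen : 0 < arr.length := List.length_pos_iff.mpr hne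
  have hidx : ((arr.length : Int) - 1) = ((arr.length - 1 : Nat) : Int) := by
    push_cast [Nat.cast_sub hlen]; ring
  have hget : PySem.List.pyGet? arr ((arr.length : Int) - 1) =
      PySem.List.pyGet? arr (-1) := by
    rw [hidx, PySem.List.pyGet?_natCast, PySem.List.pyGet?_neg_one,
        List.getLast?_eq_getElem?]
  rw [hget]
  cases h : PySem.List.pyGet? arr (-1) with
  | none => rfl
  | some v =>
    simp only
    split_ifs with hv
    · rfl
    · have heq := pyWhileA_eq_lastNZ arr (arr.length - 1) (by omega)
      rw [show arr.length - 1 + 1 = arr.length by omega,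
          List.take_of_length_le (le_refl _)] at heq
      simp only [lastNZ] at heq
      rw [heq]
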